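-- pv_equiv track=rewrite | github.com/tiernan-farrell/icebergProject | tdc.py | starKey
-- ===== SOURCE A (Python) =====
-- def starKey(row: tuple, dims: list):
--     elements = []
--     for i in range(len(row)):
--         if i in dims:
--             elements.append(row[i])
--         else:
--             elements.append('*')
--     return tuple(elements)
-- ===== SOURCE B (Python) =====
-- def starKey(row: tuple, dims: list):
--     elements = ['*'] * len(row)
--     for d in dims:
--         if 0 <= d < len(row):
--             elements[d] = row[d]
--     return tuple(elements)
-- ===== Notes on version B (the rewrite author's own statement) =====
-- stated objective: faster
-- what changed: Default-then-scatter: fill a list with '*' and overwrite positions listed in dims, instead of scanning every position with an 'i in dims' membership test.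
import Mathlib
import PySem

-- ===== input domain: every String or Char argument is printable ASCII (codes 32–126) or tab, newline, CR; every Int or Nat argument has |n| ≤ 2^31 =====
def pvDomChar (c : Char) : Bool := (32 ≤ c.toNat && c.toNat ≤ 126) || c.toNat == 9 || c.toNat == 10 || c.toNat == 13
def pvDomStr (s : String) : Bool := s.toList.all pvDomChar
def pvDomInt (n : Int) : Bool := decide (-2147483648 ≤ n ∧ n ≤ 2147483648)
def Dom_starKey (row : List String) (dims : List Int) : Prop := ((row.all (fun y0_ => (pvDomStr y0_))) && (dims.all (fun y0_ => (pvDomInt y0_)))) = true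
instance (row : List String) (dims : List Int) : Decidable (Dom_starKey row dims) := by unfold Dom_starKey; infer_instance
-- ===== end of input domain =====

-- B fills with '*' then scatters row values at the indices in dims, removing A's per-position 'i in dims' scan (faster).

-- ===== PORT A =====
-- for i in range(len(row)): append row[i] if i in dims else '*'
def starKey (row : List String) (dims : List Int) : List String :=
  (List.range row.length).foldl
    (fun (elements : List String) (i : Nat) =>
      if (i : Int) ∈ dims then elements ++ [row.getD i "*"] else elements ++ ["*"])
    []

-- ===== PORT B =====
-- elements = ['*']*len(row); for d in dims: if 0 <= d < len(row): elements[d] = row[d]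
def starKey_alt (row : List String) (dims : List Int) : List String :=
  dims.foldl
    (fun elements d =>
      if 0 ≤ d ∧ d < (row.length : Int) then elements.set d.toNat (row.getD d.toNat "*")
      else elements)
    (List.replicate row.length "*")

-- ===== PRECONDITION & SPEC =====
def Spec_starKey (row : List String) (dims : List Int) (out : List String) : Prop := out = starKey_alt row dims
instance (row : List String) (dims : List Int) (out : List String) : Decidable (Spec_starKey row dims out) := by unfold Spec_starKey; infer_instance

-- ===== CLAIM (what is proved, stated in full; the proofs are below) =====
def Claim_equal_starKey : Prop := ∀ (row : List String) (dims : List Int), Dom_starKey row dims → Spec_starKey row dims (starKey row dims)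

-- ===== LEMMAS AND PROOFS =====

-- A's fold over range n, started from acc, is acc ++ map of the pointwise choice.
theorem starKey_foldl_eq (row : List String) (dims : List Int) (n : Nat) :
    ∀ acc : List String,
      (List.range n).foldl
        (fun (elements : List String) (i : Nat) =>
          if (i : Int) ∈ dims then elements ++ [row.getD i "*"] else elements ++ ["*"]) acc
      = acc ++ (List.range n).map (fun (i : Nat) => if (i : Int) ∈ dims then row.getD i "*" else "*") := by
  induction n with
  | zero => intro acc; simp
  | succ n ih =>
    intro acc
    simp only [List.range_succ, List.foldl_append, List.foldl_cons, List.foldl_nil,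
      List.map_append, List.map_cons, List.map_nil, ih]
    split_ifs <;> simp

-- length invariant for B's fold
theorem alt_foldl_length (row : List String) (ds : List Int) :
    ∀ acc : List String,
      (ds.foldl (fun elements d =>
        if 0 ≤ d ∧ d < (row.length : Int) then elements.set d.toNat (row.getD d.toNat "*")
        else elements) acc).length = acc.length := by
  induction ds with
  | nil => intro acc; rfl
  | cons d ds ih =>
    intro acc
    simp only [List.foldl_cons]
    rw [ih]
    split_ifs <;> simp

-- pointwise value of B's fold
theorem alt_foldl_getD (row : List String) (ds : List Int) :
    ∀ (acc : List String), acc.length = row.length →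
      ∀ j : Nat, j < row.length →
        ((ds.foldl (fun elements d =>
            if 0 ≤ d ∧ d < (row.length : Int) then elements.set d.toNat (row.getD d.toNat "*")
            else elements) acc).getD j "")
        = if (j : Int) ∈ ds then row.getD j "*" else acc.getD j "" := by
  induction ds with
  | nil => intro acc _ j _; simp
  | cons d ds ih =>
    intro acc hlen j hj
    simp only [List.foldl_cons]
    by_cases hb : 0 ≤ d ∧ d < (row.length : Int)
    · rw [if_pos hb, ih _ (by simp [hlen]) j hj]
      by_cases hmem : (j : Int) ∈ ds
      · simp [hmem]
      · by_cases hdj : d = (j : Int)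
        · have hdt : d.toNat = j := by omega
          simp [hmem, hdj, List.getD,  hlen, hj]
        · have hne : d.toNat ≠ j := by omega
          simp [hmem, List.getD, hne]
          intro h; exact absurd h.symm hdj
    · rw [if_neg hb, ih _ hlen j hj]
      have hdj : ¬ ((j : Int) = d) := by omega
      by_cases hmem : (j : Int) ∈ ds
      · simp [hmem]
      · simp [hmem]
        intro h; exact absurd h hdj

theorem starKey_eq_alt (row : List String) (dims : List Int) :
    starKey row dims = starKey_alt row dims := by
  unfold starKey starKey_alt
  have hlenA :
      ((List.range row.length).foldl
        (fun (elements : List String) (i : Nat) =>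
          if (i : Int) ∈ dims then elements ++ [row.getD i "*"] else elements ++ ["*"]) []).length
      = row.length := by
    rw [starKey_foldl_eq]; simp
  have hlenB : (dims.foldl
        (fun elements d =>
          if 0 ≤ d ∧ d < (row.length : Int) then elements.set d.toNat (row.getD d.toNat "*")
          else elements) (List.replicate row.length "*")).length = row.length := by
    rw [alt_foldl_length]; simp
  apply List.ext_getElem (hlenA.trans hlenB.symm)
  intro j h1 h2
  have hj : j < row.length := by rwa [hlenA] at h1
  have hA :
      ((List.range row.length).foldl
        (fun (elements : List String) (i : Nat) =>
          if (i : Int) ∈ dims then elements ++ [row.getD i "*"] else elements ++ ["*"]) []).getD j ""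
      = if (j : Int) ∈ dims then row.getD j "*" else "*" := by
    rw [starKey_foldl_eq]
    simp [List.getD, hj]
  have hB := alt_foldl_getD row dims (List.replicate row.length "*") (by simp) j hj
  have hrep : (List.replicate row.length "*").getD j "" = "*" := by
    simp [List.getD, hj]
  rw [hrep] at hB
  have h := hA.trans hB.symm
  rw [List.getD_eq_getElem _ _ h1, List.getD_eq_getElem _ _ h2] at h
  exact h

-- ===== VERDICT (by name: the statement is the Claim_ definition above) =====
theorem starKey_spec : Claim_equal_starKey := by
  intro row dims _
  exact starKey_eq_alt row dims
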